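-- pv_equiv track=rewrite | github.com/ZhiruiLi/UIComponentDescriptor2Xml | StringProcessor.py | getNoneSpaceSite
-- ===== SOURCE A (Python) =====
-- def getNoneSpaceSite(originalString):
--     '''
--     get front and end site that is not spaces
--     output: (headSite, tailSite)
--     if no non-space char in string, headSite will larger than tailSite
--     '''
--     headSite = 0
--     tailSite = len(originalString) - 1
--     while headSite <= tailSite and originalString[headSite].isspace():
--         headSite += 1
--     if headSite <= tailSite:
--         while originalString[tailSite].isspace():
--             tailSite -= 1
--     return (headSite, tailSite)
-- ===== SOURCE B (Python) =====
-- def getNoneSpaceSite(originalString):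
--     # Single forward pass over enumerate: record the first non-space index once,
--     # overwrite the last non-space index each time; default (len, len-1) if none seen.
--     first = None
--     last = -1
--     for i, ch in enumerate(originalString):
--         if not ch.isspace():
--             if first is None:
--                 first = i
--             last = i
--     if first is None:
--         return (len(originalString), len(originalString) - 1)
--     return (first, last)
-- ===== Notes on version B (the rewrite author's own statement) =====
-- stated objective: alternative
-- what changed: A scans inward from both ends with two converging while-loops and index arithmetic; B makes a single forward pass over enumerate(s), recording the first non-space index once and overwriting the last non-space index on every non-space char, with the (len, len-1) default when none is seen.
import Mathlib
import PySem

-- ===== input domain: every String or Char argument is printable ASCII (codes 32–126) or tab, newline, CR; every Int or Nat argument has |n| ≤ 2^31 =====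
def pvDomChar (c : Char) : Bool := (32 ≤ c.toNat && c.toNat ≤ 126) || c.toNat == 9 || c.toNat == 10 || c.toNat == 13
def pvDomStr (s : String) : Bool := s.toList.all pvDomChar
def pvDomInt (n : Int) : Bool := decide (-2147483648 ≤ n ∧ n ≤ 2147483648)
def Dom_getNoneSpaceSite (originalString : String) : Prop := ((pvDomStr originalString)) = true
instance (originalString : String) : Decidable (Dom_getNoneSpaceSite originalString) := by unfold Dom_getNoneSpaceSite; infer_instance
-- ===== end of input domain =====

-- B replaces A's two converging directional scans by a single forward fold over
-- enumerate that records the first and last non-space index (objective: alternative).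


-- ===== PORT A =====
-- A's first while loop: advance headSite while in range and the char is a space.
-- (the index is always in range when read, so `getD` never takes its default)
def pvHeadLoop (l : List Char) (h : Nat) : Nat :=
  if (h : Int) ≤ (l.length : Int) - 1 ∧ PySem.Chars.isspace (l.getD h ' ') = true then
    pvHeadLoop l (h + 1)
  else h
termination_by l.length - h
decreasing_by omega

-- A's second while loop: decrement tailSite while the char is a space.  Python has no
-- lower bound check; under A's guard a non-space char exists at an index ≤ t, so the
-- base case 0 (reached only with l[0] non-space) returns 0 exactly as Python does.
def pvTailLoop (l : List Char) : Nat → Nat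
  | 0 => 0
  | (t + 1) => if PySem.Chars.isspace (l.getD (t + 1) ' ') then pvTailLoop l t else t + 1

def getNoneSpaceSite (originalString : String) : Int × Int :=
  let l := originalString.toList
  let headSite : Int := (pvHeadLoop l 0 : Int)
  let tailSite : Int := (l.length : Int) - 1
  if headSite ≤ tailSite then (headSite, (pvTailLoop l (l.length - 1) : Int))
  else (headSite, tailSite)

-- ===== PORT B =====
-- one step of B's loop body over (index, char)
def pvStep (st : Option Int × Int) (p : Int × Char) : Option Int × Int :=
  if PySem.Chars.isspace p.2 then st
  else
    match st.1 with
    | none => (some p.1, p.1)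
    | some f => (some f, p.1)

def getNoneSpaceSite_alt (originalString : String) : Int × Int :=
  let st := (PySem.List.enumerate originalString.toList 0).foldl pvStep (none, -1)
  match st.1 with
  | none => ((originalString.toList.length : Int), (originalString.toList.length : Int) - 1)
  | some f => (f, st.2)

-- ===== PRECONDITION & SPEC =====
def Spec_getNoneSpaceSite (originalString : String) (out : Int × Int) : Prop := out = getNoneSpaceSite_alt originalString
instance (originalString : String) (out : Int × Int) : Decidable (Spec_getNoneSpaceSite originalString out) := by unfold Spec_getNoneSpaceSite; infer_instance

-- ===== CLAIM (what is proved, stated in full; the proofs are below) =====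
def Claim_equal_getNoneSpaceSite : Prop := ∀ (originalString : String), Dom_getNoneSpaceSite originalString → Spec_getNoneSpaceSite originalString (getNoneSpaceSite originalString)

-- ===== LEMMAS AND PROOFS =====

-- the predicate "non-space", the thing both programs search for
def pvQ (c : Char) : Bool := !PySem.Chars.isspace c

-- A's head loop finds the first non-space index at or after h (l.length if none)
theorem pvHeadLoop_eq (l : List Char) (h : Nat) (hh : h ≤ l.length) :
    pvHeadLoop l h = h + List.findIdx pvQ (l.drop h) := by
  fun_induction pvHeadLoop l h with
  | case1 h hc ih =>
    obtain ⟨hlt, hsp⟩ := hc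
    have hlen : h < l.length := by omega
    rw [List.drop_eq_getElem_cons hlen, List.findIdx_cons]
    have hget : l.getD h ' ' = l[h] := List.getD_eq_getElem l ' ' hlen
    rw [hget] at hsp
    simp only [pvQ, hsp, Bool.not_true, cond_false]
    rw [ih (by omega)]
    omega
  | case2 h hc =>
    by_cases hlen : h < l.length
    · have hsp : PySem.Chars.isspace (l.getD h ' ') = false := by
        rcases Bool.eq_false_or_eq_true (PySem.Chars.isspace (l.getD h ' ')) with h1 | h1
        · exact absurd ⟨by omega, h1⟩ hc
        · exact h1
      rw [List.drop_eq_getElem_cons hlen, List.findIdx_cons]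
      have hget : l.getD h ' ' = l[h] := List.getD_eq_getElem l ' ' hlen
      rw [hget] at hsp
      simp [pvQ, hsp]
    · have : l.length ≤ h := by omega
      rw [List.drop_eq_nil_of_le this]
      simp

-- A's tail loop finds the last non-space index ≤ t, provided one exists
theorem pvTailLoop_eq (l : List Char) (t : Nat) (ht : t < l.length)
    (hex : ∃ i, ∃ _ : i < l.length, i ≤ t ∧ pvQ l[i] = true) :
    pvTailLoop l t = t - List.findIdx pvQ ((l.take (t + 1)).reverse) ∧
    List.findIdx pvQ ((l.take (t + 1)).reverse) ≤ t := by
  induction t with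
  | zero =>
    obtain ⟨i, hi, hle, hq⟩ := hex
    have hi0 : i = 0 := by omega
    subst hi0
    have h1 : l.take 1 = [l[0]] := by
      rw [List.take_one]
      cases l with
      | nil => simp at ht
      | cons a as => simp
    rw [h1]
    simp [List.findIdx_cons, hq, pvTailLoop]
  | succ t ih =>
    have htake : l.take (t + 2) = l.take (t + 1) ++ [l[t + 1]] := by
      rw [List.take_add_one]
      simp [List.getElem?_eq_getElem ht]
    have hget : l.getD (t + 1) ' ' = l[t + 1] := List.getD_eq_getElem l ' ' ht
    by_cases hsp : PySem.Chars.isspace (l.getD (t + 1) ' ') = true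
    · have hq1 : pvQ l[t + 1] = false := by
        simp only [pvQ, Bool.not_eq_false']; rw [← hget]; exact hsp
      have hex' : ∃ i, ∃ _ : i < l.length, i ≤ t ∧ pvQ l[i] = true := by
        obtain ⟨i, hi, hle, hq⟩ := hex
        refine ⟨i, hi, ?_, hq⟩
        rcases Nat.lt_or_ge i (t + 1) with h1 | h1
        · omega
        · have hit : i = t + 1 := by omega
          subst hit
          rw [hq1] at hq; simp at hq
      obtain ⟨ihv, ihle⟩ := ih (by omega) hex'
      rw [pvTailLoop, if_pos hsp, htake]
      simp only [List.reverse_append, List.reverse_singleton, List.singleton_append,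
        List.findIdx_cons, hq1, cond_false]
      constructor <;> omega
    · have hq1 : pvQ l[t + 1] = true := by
        simp only [pvQ, Bool.not_eq_true']
        rw [← hget]; simpa using hsp
      rw [pvTailLoop, if_neg hsp, htake]
      simp only [List.reverse_append, List.reverse_singleton, List.singleton_append,
        List.findIdx_cons, hq1, cond_true]
      omega

-- B's fold computes (first non-space index, last non-space index), or (none, -1)
theorem pvFold_eq (l : List Char) :
    (PySem.List.enumerate l 0).foldl pvStep (none, -1) =
      if List.findIdx pvQ l < l.length then
        ((some (List.findIdx pvQ l : Int) : Option Int),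
          (l.length : Int) - 1 - (List.findIdx pvQ l.reverse : Int))
      else (none, -1) := by
  induction l using List.reverseRecOn with
  | nil => simp [PySem.List.enumerate]
  | append_singleton xs x ih =>
    rw [PySem.List.enumerate_append, List.foldl_append, ih]
    have henum : PySem.List.enumerate [x] ((0 : Int) + (xs.length : Int)) =
        [((xs.length : Int), x)] := by
      simp [PySem.List.enumerate_cons, PySem.List.enumerate_nil]
    rw [henum]
    simp only [List.foldl_cons, List.foldl_nil]
    have hfa : List.findIdx pvQ (xs ++ [x]) =
        if List.findIdx pvQ xs < xs.length then List.findIdx pvQ xs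
        else List.findIdx pvQ [x] + xs.length := List.findIdx_append
    have hrev : (xs ++ [x]).reverse = x :: xs.reverse := by simp
    by_cases hsp : PySem.Chars.isspace x = true
    · -- x is a space: the step leaves the state unchanged
      have hqx : pvQ x = false := by simp [pvQ, hsp]
      have h1x : List.findIdx pvQ [x] = 1 := by simp [List.findIdx_cons, hqx]
      by_cases hlt : List.findIdx pvQ xs < xs.length
      · have h1 : List.findIdx pvQ (xs ++ [x]) = List.findIdx pvQ xs := by
          rw [hfa, if_pos hlt]
        have h2 : List.findIdx pvQ (xs ++ [x]) < (xs ++ [x]).length := by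
          rw [h1]; simp; omega
        rw [if_pos hlt, if_pos h2, h1, hrev]
        simp only [pvStep, hsp, if_true, List.findIdx_cons, hqx, cond_false,
          Prod.mk.injEq]
        refine ⟨trivial, ?_⟩
        simp only [List.length_append, List.length_singleton]
        push_cast
        ring
      · have h2 : ¬ List.findIdx pvQ (xs ++ [x]) < (xs ++ [x]).length := by
          rw [hfa, if_neg hlt, h1x]; simp
        rw [if_neg hlt, if_neg h2]
        simp [pvStep, hsp]
    · -- x is non-space
      have hq : pvQ x = true := by simp [pvQ, hsp]
      have hspf : PySem.Chars.isspace x = false := by simpa using hsp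
      have h0 : List.findIdx pvQ [x] = 0 := by simp [List.findIdx_cons, hq]
      by_cases hlt : List.findIdx pvQ xs < xs.length
      · have h1 : List.findIdx pvQ (xs ++ [x]) = List.findIdx pvQ xs := by
          rw [hfa, if_pos hlt]
        have h2 : List.findIdx pvQ (xs ++ [x]) < (xs ++ [x]).length := by
          rw [h1]; simp; omega
        rw [if_pos hlt, if_pos h2, h1, hrev]
        simp only [pvStep, hspf, Bool.false_eq_true, if_false, List.findIdx_cons, hq,
          cond_true, Prod.mk.injEq]
        refine ⟨trivial, ?_⟩
        simp only [List.length_append, List.length_singleton]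
        push_cast
        ring
      · have h1 : List.findIdx pvQ (xs ++ [x]) = xs.length := by
          rw [hfa, if_neg hlt, h0]; omega
        have h2 : List.findIdx pvQ (xs ++ [x]) < (xs ++ [x]).length := by
          rw [h1]; simp
        rw [if_neg hlt, if_pos h2, h1, hrev]
        simp only [pvStep, hspf, Bool.false_eq_true, if_false, List.findIdx_cons, hq,
          cond_true, Prod.mk.injEq]
        refine ⟨trivial, ?_⟩
        simp only [List.length_append, List.length_singleton]
        push_cast
        ring

-- ===== VERDICT (by name: the statement is the Claim_ definition above) =====
theorem getNoneSpaceSite_spec : Claim_equal_getNoneSpaceSite := by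
  intro s _
  unfold Spec_getNoneSpaceSite getNoneSpaceSite getNoneSpaceSite_alt
  set l := s.toList with hl
  have hhead : pvHeadLoop l 0 = List.findIdx pvQ l := by
    simpa using pvHeadLoop_eq l 0 (Nat.zero_le _)
  rw [pvFold_eq l]
  by_cases hlt : List.findIdx pvQ l < l.length
  · -- a non-space char exists
    have hne : l.length ≠ 0 := by omega
    have hex : ∃ i, ∃ _ : i < l.length, i ≤ l.length - 1 ∧ pvQ l[i] = true := by
      refine ⟨List.findIdx pvQ l, hlt, by omega, ?_⟩
      exact List.findIdx_getElem
    obtain ⟨hv, hle⟩ := pvTailLoop_eq l (l.length - 1) (by omega) hex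
    have htake : l.take (l.length - 1 + 1) = l := by
      rw [List.take_of_length_le]; omega
    rw [htake] at hv hle
    have hrevlt : List.findIdx pvQ l.reverse ≤ l.length - 1 := hle
    have hguard : (pvHeadLoop l 0 : Int) ≤ (l.length : Int) - 1 := by
      rw [hhead]; omega
    rw [if_pos hlt, if_pos hguard, hv, hhead]
    simp only [Prod.mk.injEq]
    refine ⟨trivial, ?_⟩
    omega
  · -- all spaces (or empty): head = length, guard fails
    have heq : List.findIdx pvQ l = l.length := by
      have := List.findIdx_le_length (p := pvQ) (xs := l)
      omega
    have hguard : ¬ (pvHeadLoop l 0 : Int) ≤ (l.length : Int) - 1 := by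
      rw [hhead, heq]; omega
    rw [if_neg hlt, if_neg hguard]
    simp [hhead, heq]
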